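-- pv_equiv track=rewrite | github.com/CraftSpider/TalosBot | Discord/utils.py | capital_split
-- ===== SOURCE A (Python) =====
-- def capital_split(text):
--     out = ""
--     for char in text:
--         if char.isupper():
--             out += " {}".format(char)
--         else:
--             out += char
--     return out.strip(" ")
-- ===== SOURCE B (Python) =====
-- def capital_split(text):
--     table = {ord(c): ' ' + c for c in set(text) if c.isupper()}
--     return text.translate(table).strip(' ')
-- ===== Notes on version B (the rewrite author's own statement) =====
-- stated objective: idiomatic
-- what changed: B precomputes a translation table mapping each distinct uppercase character to a space plus that character and applies it in one str.translate pass instead of A's per-character loop with branch and quadratic string concatenation.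
import Mathlib
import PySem

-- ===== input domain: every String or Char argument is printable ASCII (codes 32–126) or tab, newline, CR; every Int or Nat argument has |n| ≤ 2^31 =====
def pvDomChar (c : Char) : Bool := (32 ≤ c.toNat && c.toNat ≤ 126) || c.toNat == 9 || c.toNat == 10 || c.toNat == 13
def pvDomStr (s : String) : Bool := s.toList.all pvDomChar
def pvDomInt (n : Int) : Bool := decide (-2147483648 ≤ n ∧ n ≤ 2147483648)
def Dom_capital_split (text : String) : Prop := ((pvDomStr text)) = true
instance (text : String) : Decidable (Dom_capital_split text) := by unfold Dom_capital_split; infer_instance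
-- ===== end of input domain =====

-- B builds a translation table (uppercase char ↦ " "+char) once and applies it in a single pass; objective: idiomatic.

-- ===== PORT A =====
-- per-character loop: out += " "+char if char.isupper() else char; then out.strip(" ")
def capital_split (text : String) : String :=
  let out : List Char :=
    text.toList.foldl
      (fun out c => if PySem.Chars.isupper c then out ++ [' ', c] else out ++ [c]) []
  String.mk (PySem.Chars.stripChars out [' '])

-- ===== PORT B =====
-- table = {c: ' '+c for c in set(text) if c.isupper()}; text.translate(table).strip(' ')
def capital_split_alt (text : String) : String :=
  let table : PySem.Dict Char (List Char) :=
    (((PySem.Set.ofList text.toList : PySem.Set Char).filter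
        (fun c => PySem.Chars.isupper c))).foldl
      (fun d c => d.insert c [' ', c]) PySem.Dict.empty
  -- str.translate: each char replaced by its table entry, unmapped chars kept
  String.mk (PySem.Chars.stripChars (text.toList.flatMap (fun c => table.getD c [c])) [' '])

-- ===== PRECONDITION & SPEC =====
def Spec_capital_split (text : String) (out : String) : Prop := out = capital_split_alt text
instance (text : String) (out : String) : Decidable (Spec_capital_split text out) := by unfold Spec_capital_split; infer_instance

-- ===== CLAIM (what is proved, stated in full; the proofs are below) =====
def Claim_equal_capital_split : Prop := ∀ (text : String), Dom_capital_split text → Spec_capital_split text (capital_split text)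

-- ===== LEMMAS AND PROOFS =====

-- lookup in a dict built by inserting (k, v k) for every k of a list
theorem getD_foldl_insert_fun {ν : Type} (l : List Char) (v : Char → ν)
    (d : PySem.Dict Char ν) (k : Char) (dflt : ν) :
    (l.foldl (fun d c => d.insert c (v c)) d).getD k dflt
      = if k ∈ l then v k else d.getD k dflt := by
  induction l generalizing d with
  | nil => simp
  | cons a l ih =>
    simp only [List.foldl_cons, ih, List.mem_cons]
    by_cases hl : k ∈ l
    · simp [hl]
    · by_cases ha : k = a
      · subst ha; simp [hl, PySem.Dict.getD_insert_self]
      · simp [hl, ha, PySem.Dict.getD_insert]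

theorem capital_split_table (text : String) (c : Char) (hc : c ∈ text.toList) :
    ((((PySem.Set.ofList text.toList : PySem.Set Char).filter
        (fun c => PySem.Chars.isupper c))).foldl
      (fun d c => d.insert c [' ', c]) (PySem.Dict.empty : PySem.Dict Char (List Char))).getD c [c]
      = if PySem.Chars.isupper c then [' ', c] else [c] := by
  rw [getD_foldl_insert_fun]
  by_cases h : PySem.Chars.isupper c
  · simp [h, List.mem_filter, PySem.Set.mem_ofList, hc]
  · simp [h, List.mem_filter]

-- ===== VERDICT (by name: the statement is the Claim_ definition above) =====
theorem capital_split_spec : Claim_equal_capital_split := by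
  intro text _
  unfold Spec_capital_split capital_split capital_split_alt
  simp only
  have hfn : (fun (out : List Char) c =>
      if PySem.Chars.isupper c then out ++ [' ', c] else out ++ [c])
      = (fun (out : List Char) c =>
          out ++ (if PySem.Chars.isupper c then [' ', c] else [c])) := by
    funext out c; split <;> rfl
  rw [hfn, PySem.List.foldl_append_eq_flatMap]
  have : text.toList.flatMap
      (fun c => ((((PySem.Set.ofList text.toList : PySem.Set Char).filter
        (fun c => PySem.Chars.isupper c))).foldl
        (fun d c => d.insert c [' ', c]) (PySem.Dict.empty : PySem.Dict Char (List Char))).getD c [c])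
      = text.toList.flatMap (fun c => if PySem.Chars.isupper c then [' ', c] else [c]) := by
    apply List.flatMap_congr
    intro c hc
    exact capital_split_table text c hc
  rw [this, List.nil_append]
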